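-- pv_equiv track=rewrite | github.com/AdirB100/CS1001.py-HW | HW2/Q3.py | has_repeat1
-- ===== SOURCE A (Python) =====
-- def has_repeat1(s, k):
--     seq_list = []
--     for i in range(len(s) - k + 1):
--         seq_list.append(s[i:i + k])
--     for seq in seq_list:
--         if seq_list.count(seq) > 1:
--             return True
--     return False
-- ===== SOURCE B (Python) =====
-- def has_repeat1(s, k):
--     # one pass with a set of slices seen so far: the inner count rescan disappears
--     seen = set()
--     for i in range(len(s) - k + 1):
--         w = s[i:i + k]
--         if w in seen:
--             return True
--         seen.add(w)
--     return False
-- ===== Notes on version B (the rewrite author's own statement) =====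
-- stated objective: faster
-- what changed: Single pass that stops at the first slice already seen, using a hash set of slices, instead of building the whole slice list and rescanning it with list.count for every element.
import Mathlib
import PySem

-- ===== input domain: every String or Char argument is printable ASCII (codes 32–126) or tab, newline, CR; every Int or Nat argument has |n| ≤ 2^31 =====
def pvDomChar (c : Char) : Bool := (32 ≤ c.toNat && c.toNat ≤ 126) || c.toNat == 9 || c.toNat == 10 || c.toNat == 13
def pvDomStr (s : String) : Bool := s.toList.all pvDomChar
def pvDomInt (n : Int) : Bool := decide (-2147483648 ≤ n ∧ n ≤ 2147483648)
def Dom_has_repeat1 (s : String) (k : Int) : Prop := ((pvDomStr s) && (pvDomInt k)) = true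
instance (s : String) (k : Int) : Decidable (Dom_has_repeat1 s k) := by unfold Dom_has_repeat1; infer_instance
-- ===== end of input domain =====

-- B makes one early-exit pass with a set of already-seen slices instead of A's per-element list.count rescans (faster).


-- ===== PORT A =====
-- A's second loop: return True on the first seq whose count in the whole list exceeds 1
def hasRepScan (full : List (List Char)) : List (List Char) → Bool
  | [] => false
  | seq :: rest => if full.count seq > 1 then true else hasRepScan full rest

def has_repeat1 (s : String) (k : Int) : Bool :=
  let cs := s.toList
  -- A's first loop appends s[i:i+k] for each i; the built list is the map over the range
  let seqList := (PySem.List.pyRange 0 ((cs.length : Int) - k + 1) 1).map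
      (fun i => PySem.List.slice cs (some i) (some (i + k)))
  hasRepScan seqList seqList

-- ===== PORT B =====
-- B's loop over i: slice, test membership in `seen`, early exit or add
def seenLoop (cs : List Char) (k : Int) (seen : PySem.Set (List Char)) : List Int → Bool
  | [] => false
  | i :: rest =>
      let w := PySem.List.slice cs (some i) (some (i + k))
      if PySem.Set.contains seen w then true else seenLoop cs k (PySem.Set.add seen w) rest

def has_repeat1_alt (s : String) (k : Int) : Bool :=
  let cs := s.toList
  seenLoop cs k PySem.Set.empty (PySem.List.pyRange 0 ((cs.length : Int) - k + 1) 1)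

-- ===== PRECONDITION & SPEC =====
def Spec_has_repeat1 (s : String) (k : Int) (out : Bool) : Prop := out = has_repeat1_alt s k
instance (s : String) (k : Int) (out : Bool) : Decidable (Spec_has_repeat1 s k out) := by unfold Spec_has_repeat1; infer_instance

-- ===== CLAIM (what is proved, stated in full; the proofs are below) =====
def Claim_equal_has_repeat1 : Prop := ∀ (s : String) (k : Int), Dom_has_repeat1 s k → Spec_has_repeat1 s k (has_repeat1 s k)

-- ===== LEMMAS AND PROOFS =====

-- A's scan finds a hit iff some element of the suffix occurs more than once in the full list
theorem hasRepScan_iff (full : List (List Char)) (l : List (List Char)) :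
    hasRepScan full l = true ↔ ∃ x ∈ l, 1 < full.count x := by
  induction l with
  | nil => simp [hasRepScan]
  | cons a t ih =>
    simp only [hasRepScan]
    split_ifs with h
    · simp [h]
    · simp [ih, h]

-- A's result on the whole list: true iff the list has a duplicate
theorem hasRepScan_self_iff (l : List (List Char)) :
    hasRepScan l l = true ↔ ¬ l.Nodup := by
  rw [hasRepScan_iff, List.nodup_iff_count_le_one]
  constructor
  · rintro ⟨x, _, hx⟩ h; exact absurd (h x) (by omega)
  · intro h
    push Not at h
    obtain ⟨x, hx⟩ := h
    refine ⟨x, ?_, by omega⟩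
    exact List.count_pos_iff.mp (by omega)

-- B's loop: true iff some slice was already seen, or the remaining slices repeat
theorem seenLoop_iff (cs : List Char) (k : Int) (seen : PySem.Set (List Char))
    (idxs : List Int) :
    seenLoop cs k seen idxs = true ↔
      (∃ i ∈ idxs, PySem.List.slice cs (some i) (some (i + k)) ∈ seen) ∨
        ¬ (idxs.map (fun i => PySem.List.slice cs (some i) (some (i + k)))).Nodup := by
  induction idxs generalizing seen with
  | nil => simp [seenLoop]
  | cons i rest ih =>
    simp only [seenLoop]
    by_cases hmem : PySem.List.slice cs (some i) (some (i + k)) ∈ seen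
    · simp only [PySem.Set.contains, List.contains_iff_mem, hmem, if_pos]
      constructor
      · intro _; exact Or.inl ⟨i, by simp, hmem⟩
      · intro _; trivial
    · rw [if_neg (by simpa [PySem.Set.contains, List.contains_iff_mem] using hmem)]
      rw [ih]
      simp only [PySem.Set.mem_add, List.mem_cons, List.map_cons, List.nodup_cons,
        List.mem_map, not_and]
      constructor
      · rintro (⟨j, hj, hjs | hjs⟩ | hnd)
        · exact Or.inl ⟨j, Or.inr hj, hjs⟩
        · exact Or.inr fun hh => absurd ⟨j, hj, hjs⟩ hh
        · exact Or.inr fun _ => hnd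
      · rintro (⟨j, hj | hj, hjs⟩ | hnd)
        · exact absurd (hj ▸ hjs) hmem
        · exact Or.inl ⟨j, hj, Or.inl hjs⟩
        · by_cases hdup : ∃ j ∈ rest,
              PySem.List.slice cs (some j) (some (j + k)) = PySem.List.slice cs (some i) (some (i + k))
          · obtain ⟨j, hj, hjs⟩ := hdup
            exact Or.inl ⟨j, hj, Or.inr hjs⟩
          · exact Or.inr (hnd (fun hh => absurd hh hdup))

-- ===== VERDICT (by name: the statement is the Claim_ definition above) =====
theorem has_repeat1_spec : Claim_equal_has_repeat1 := by
  intro s k _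
  unfold Spec_has_repeat1 has_repeat1 has_repeat1_alt
  rw [Bool.eq_iff_iff, hasRepScan_self_iff, seenLoop_iff]
  simp [PySem.Set.empty]
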